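-- pv_equiv track=rewrite | github.com/lzpgood123/bili-spider | app.py | filter_by_title
-- ===== SOURCE A (Python) =====
-- from typing import List, Dict, Optional
--
-- def filter_by_title(videos: List[Dict], keywords: List[str]) -> List[Dict]:
--     """按标题关键词筛选"""
--     if not keywords:
--         return videos
--
--     filtered = []
--     for video in videos:
--         title = video.get("title", "").lower()
--         if all(k.lower() in title for k in keywords):
--             filtered.append(video)
--
--     return filtered
-- ===== SOURCE B (Python) =====
-- from typing import List, Dict
--
-- def _contains_all(title, kws):
--     if not kws:
--         return True
--     return kws[0] in title and _contains_all(title, kws[1:])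
--
-- def _go(videos, kws):
--     if not videos:
--         return []
--     head, rest = videos[0], videos[1:]
--     tail = _go(rest, kws)
--     if _contains_all(head.get("title", "").lower(), kws):
--         return [head] + tail
--     return tail
--
-- def filter_by_title(videos: List[Dict], keywords: List[str]) -> List[Dict]:
--     """按标题关键词筛选"""
--     if not keywords:
--         return videos
--     return _go(videos, [k.lower() for k in keywords])
-- ===== Notes on version B (the rewrite author's own statement) =====
-- stated objective: alternative
-- what changed: A does an accumulator loop appending videos whose title passes an inner all() that re-lowers every keyword per video; B pre-lowers the keywords once and then builds the result by structural recursion on the video list with a recursive containment check, no accumulator.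
import Mathlib
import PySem

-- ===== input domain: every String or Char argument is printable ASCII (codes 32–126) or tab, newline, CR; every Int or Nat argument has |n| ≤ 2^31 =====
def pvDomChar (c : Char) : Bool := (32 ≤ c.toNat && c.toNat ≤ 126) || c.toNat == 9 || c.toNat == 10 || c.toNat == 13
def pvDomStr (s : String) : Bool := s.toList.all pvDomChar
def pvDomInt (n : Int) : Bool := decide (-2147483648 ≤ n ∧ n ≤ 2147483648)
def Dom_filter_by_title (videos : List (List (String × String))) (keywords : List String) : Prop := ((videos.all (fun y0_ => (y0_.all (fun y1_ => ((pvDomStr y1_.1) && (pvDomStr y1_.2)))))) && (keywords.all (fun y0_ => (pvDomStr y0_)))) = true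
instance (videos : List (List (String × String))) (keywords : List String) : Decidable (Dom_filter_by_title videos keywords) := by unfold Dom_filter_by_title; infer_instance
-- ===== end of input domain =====

-- B replaces A's accumulator loop with an inner all() by a structural recursion over the videos
-- using a pre-lowered keyword list and a recursive containment check; alternative decomposition, same cost.

-- ===== PORT A =====
def filter_by_title (videos : List (List (String × String))) (keywords : List String) : List (List (String × String)) :=
  if keywords = [] then videos
  else
    videos.foldl (fun filtered video =>
      let title := PySem.Str.lower (PySem.Dict.getD ⟨video⟩ "title" "")
      if keywords.all (fun k => PySem.Str.isIn (PySem.Str.lower k) title)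
      then filtered ++ [video] else filtered) []

-- ===== PORT B =====
def pvContainsAll (title : String) : List String → Bool
  | [] => true
  | kw :: rest => PySem.Str.isIn kw title && pvContainsAll title rest

def pvGo (kws : List String) : List (List (String × String)) → List (List (String × String))
  | [] => []
  | head :: rest =>
    let tail := pvGo kws rest
    if pvContainsAll (PySem.Str.lower (PySem.Dict.getD ⟨head⟩ "title" "")) kws
    then head :: tail else tail

def filter_by_title_alt (videos : List (List (String × String))) (keywords : List String) : List (List (String × String)) :=
  if keywords = [] then videos
  else pvGo (keywords.map PySem.Str.lower) videos

-- ===== PRECONDITION & SPEC =====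
def Spec_filter_by_title (videos : List (List (String × String))) (keywords : List String) (out : List (List (String × String))) : Prop := out = filter_by_title_alt videos keywords
instance (videos : List (List (String × String))) (keywords : List String) (out : List (List (String × String))) : Decidable (Spec_filter_by_title videos keywords out) := by unfold Spec_filter_by_title; infer_instance

-- ===== CLAIM (what is proved, stated in full; the proofs are below) =====
def Claim_equal_filter_by_title : Prop := ∀ (videos : List (List (String × String))) (keywords : List String), Dom_filter_by_title videos keywords → Spec_filter_by_title videos keywords (filter_by_title videos keywords)

-- ===== LEMMAS AND PROOFS =====

theorem pvContainsAll_eq_all (title : String) (ks : List String) :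
    pvContainsAll title (ks.map PySem.Str.lower) = ks.all (fun k => PySem.Str.isIn (PySem.Str.lower k) title) := by
  induction ks with
  | nil => rfl
  | cons k ks ih => simp [pvContainsAll, ih]

theorem pvGo_eq_filter (ks : List String) (vs : List (List (String × String))) :
    pvGo (ks.map PySem.Str.lower) vs
      = vs.filter (fun v => ks.all (fun k => PySem.Str.isIn (PySem.Str.lower k) (PySem.Str.lower (PySem.Dict.getD ⟨v⟩ "title" "")))) := by
  induction vs with
  | nil => rfl
  | cons v vs ih =>
    simp only [pvGo, ih, List.filter_cons, pvContainsAll_eq_all]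

-- ===== VERDICT (by name: the statement is the Claim_ definition above) =====
theorem filter_by_title_spec : Claim_equal_filter_by_title := by
  intro videos keywords _
  unfold Spec_filter_by_title filter_by_title filter_by_title_alt
  by_cases h : keywords = []
  · simp [h]
  · simp only [if_neg h]
    rw [PySem.List.foldl_append_if, pvGo_eq_filter]
    simp
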